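-- pv_equiv track=rewrite | github.com/RedPenguin100/TAUSO | src/tauso/features/sequence/seq_features.py | gc_block_length
-- ===== SOURCE A (Python) =====
-- def gc_block_length(seq):
--     """
--     find the length of the longest consecutive G/C block in the sequence
--     """
--     seq = seq.upper()
--     max_len = 0
--     curr_len = 0
--     for base in seq:
--         if base in "GC":
--             curr_len += 1
--             max_len = max(max_len, curr_len)
--         else:
--             curr_len = 0
--     return max_len
-- ===== SOURCE B (Python) =====
-- def gc_block_length(seq):
--     """
--     find the length of the longest consecutive G/C block in the sequence
--     """
--     s = seq.upper()
--     breaks = [-1] + [i for i, c in enumerate(s) if c not in "GC"] + [len(s)]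
--     return max(b - a - 1 for a, b in zip(breaks, breaks[1:]))
-- ===== Notes on version B (the rewrite author's own statement) =====
-- stated objective: alternative
-- what changed: B computes the index positions of all non-G/C characters (bracketed by sentinels -1 and len(s)) and returns the maximum gap between consecutive break positions minus one, instead of A's single-pass running counter with an interleaved maximum.
import Mathlib
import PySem

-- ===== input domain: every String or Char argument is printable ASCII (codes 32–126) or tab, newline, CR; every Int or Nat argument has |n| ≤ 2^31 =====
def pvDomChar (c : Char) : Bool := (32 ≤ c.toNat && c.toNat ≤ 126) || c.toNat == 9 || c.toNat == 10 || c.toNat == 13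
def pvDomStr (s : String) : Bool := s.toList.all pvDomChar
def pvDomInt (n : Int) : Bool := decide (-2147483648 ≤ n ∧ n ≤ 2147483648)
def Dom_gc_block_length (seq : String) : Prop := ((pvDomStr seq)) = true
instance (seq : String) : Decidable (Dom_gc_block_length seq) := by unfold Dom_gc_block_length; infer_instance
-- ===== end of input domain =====

-- B finds the positions of all non-G/C characters (with sentinels -1 and len)
-- and returns the largest gap between consecutive positions minus one,
-- instead of A's running-counter scan (objective: alternative).


-- ===== PORT A =====
-- `base in "GC"` for a single character is membership in {'G','C'}
def pvIsGC (c : Char) : Bool := c == 'G' || c == 'C'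

def gc_block_length (seq : String) : Int :=
  -- seq = seq.upper(); the loop carries (max_len, curr_len) over the characters
  ((PySem.Str.upper seq).toList.foldl
    (fun (st : Int × Int) base =>
      if pvIsGC base then (max st.1 (st.2 + 1), st.2 + 1) else (st.1, 0))
    (0, 0)).1

-- ===== PORT B =====
-- max over a NONEMPTY list (Python's max of a nonempty iterable; here the
-- generator always yields at least one gap since breaks has ≥ 2 elements)
def pvMax1 : List Int → Int
  | [] => 0
  | x :: t => t.foldl max x

-- (xs.zip xs.tail).map (b - a - 1) = [b - a - 1 for a, b in zip(xs, xs[1:])]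
def pvGaps (xs : List Int) : List Int :=
  (xs.zip xs.tail).map (fun p => p.2 - p.1 - 1)

def gc_block_length_alt (seq : String) : Int :=
  let s := (PySem.Str.upper seq).toList
  -- breaks = [-1] + [i for i, c in enumerate(s) if c not in "GC"] + [len(s)]
  let breaks : List Int :=
    [-1] ++ ((PySem.List.enumerate s).filter (fun p => ! pvIsGC p.2)).map (fun p => p.1)
         ++ [(s.length : Int)]
  -- return max(b - a - 1 for a, b in zip(breaks, breaks[1:]))
  pvMax1 (pvGaps breaks)

-- ===== PRECONDITION & SPEC =====
def Spec_gc_block_length (seq : String) (out : Int) : Prop := out = gc_block_length_alt seq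
instance (seq : String) (out : Int) : Decidable (Spec_gc_block_length seq out) := by unfold Spec_gc_block_length; infer_instance

-- ===== CLAIM (what is proved, stated in full; the proofs are below) =====
def Claim_equal_gc_block_length : Prop := ∀ (seq : String), Dom_gc_block_length seq → Spec_gc_block_length seq (gc_block_length seq)

-- ===== LEMMAS AND PROOFS =====

-- break positions (non-G/C indices) of l, indices starting at i
def pvBreaks (l : List Char) (i : Int) : List Int :=
  match l with
  | [] => []
  | c :: t => if pvIsGC c then pvBreaks t (i + 1) else i :: pvBreaks t (i + 1)

-- max gap minus 1 over consecutive pairs of prev :: bs ++ [fin]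
def pvG (prev : Int) (bs : List Int) (fin : Int) : Int :=
  match bs with
  | [] => fin - prev - 1
  | b :: bs => max (b - prev - 1) (pvG b bs fin)

lemma pvBreaks_ge (l : List Char) (i : Int) : ∀ b ∈ pvBreaks l i, i ≤ b := by
  induction l generalizing i with
  | nil => simp [pvBreaks]
  | cons c t ih =>
    intro b hb
    by_cases h : pvIsGC c = true <;> simp [pvBreaks, h] at hb
    · have := ih (i + 1) b hb; omega
    · rcases hb with rfl | hb
      · omega
      · have := ih (i + 1) b hb; omega

lemma pvBreaks_lt (l : List Char) (i : Int) : ∀ b ∈ pvBreaks l i, b < i + l.length := by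
  induction l generalizing i with
  | nil => simp [pvBreaks]
  | cons c t ih =>
    intro b hb
    by_cases h : pvIsGC c = true <;> simp [pvBreaks, h] at hb
    · have := ih (i + 1) b hb; simp only [List.length_cons]; push_cast; omega
    · rcases hb with rfl | hb
      · simp only [List.length_cons]; push_cast; omega
      · have := ih (i + 1) b hb; simp only [List.length_cons]; push_cast; omega

lemma pvG_nonneg (prev : Int) (bs : List Int) (fin : Int)
    (hprev : prev < fin) (hbs : ∀ b ∈ bs, b < fin) : 0 ≤ pvG prev bs fin := by
  induction bs generalizing prev with
  | nil => simp only [pvG]; omega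
  | cons b t ih =>
    have h1 := hbs b List.mem_cons_self
    have h2 := ih b h1 (fun x hx => hbs x (List.mem_cons_of_mem _ hx))
    simp only [pvG]
    omega

-- lower bound: pvG prev bs fin ≥ j - prev - 1 when every break and fin is ≥ j
lemma pvG_lower (prev : Int) (bs : List Int) (fin : Int) (j : Int)
    (hbs : ∀ b ∈ bs, j ≤ b) (hfin : j ≤ fin) :
    j - prev - 1 ≤ pvG prev bs fin := by
  cases bs with
  | nil => simp only [pvG]; omega
  | cons b t =>
    have := hbs b List.mem_cons_self
    simp only [pvG]; omega

-- the loop invariant for A: starting at index i with curr = i - prev - 1 and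
-- running max m, A's fold computes max m (pvG over the remaining breaks)
lemma pv_inv (l : List Char) : ∀ (prev i m : Int),
    0 ≤ m → i - prev - 1 ≤ m → prev ≤ i - 1 →
    (l.foldl (fun (st : Int × Int) base =>
        if pvIsGC base then (max st.1 (st.2 + 1), st.2 + 1) else (st.1, 0))
      (m, i - prev - 1)).1
    = max m (pvG prev (pvBreaks l i) (i + l.length)) := by
  induction l with
  | nil =>
    intro prev i m hm0 hmc hprev
    simp only [List.foldl_nil, pvBreaks, pvG, List.length_nil]
    omega
  | cons c t ih =>
    intro prev i m hm0 hmc hprev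
    simp only [List.foldl_cons, List.length_cons]
    by_cases h : pvIsGC c = true
    · simp only [h, if_true, pvBreaks]
      have hc1 : i - prev - 1 + 1 = (i + 1) - prev - 1 := by omega
      rw [hc1]
      have := ih prev (i + 1) (max m ((i + 1) - prev - 1)) (by omega) (by omega) (by omega)
      rw [this]
      have hge := pvBreaks_ge t (i + 1)
      have hlow := pvG_lower prev (pvBreaks t (i + 1)) (i + 1 + t.length) (i + 1) hge (by omega)
      have harith : (i : Int) + 1 + t.length = i + (t.length + 1 : Nat) := by push_cast; omega
      rw [harith] at hlow ⊢
      omega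
    · simp only [h, if_false, Bool.false_eq_true, pvBreaks, pvG]
      have := ih i (i + 1) m hm0 (by omega) (by omega)
      rw [show (i + 1) - i - 1 = (0 : Int) by omega] at this
      rw [this]
      have harith : (i : Int) + 1 + t.length = i + (t.length + 1 : Nat) := by push_cast; omega
      rw [harith]
      omega

-- the filtered enumeration of B is exactly pvBreaks
lemma pv_enum_breaks (l : List Char) : ∀ (i : Int),
    ((PySem.List.enumerate l i).filter (fun p => ! pvIsGC p.2)).map (fun p => p.1)
    = pvBreaks l i := by
  induction l with
  | nil => intro i; simp [PySem.List.enumerate_nil, pvBreaks]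
  | cons c t ih =>
    intro i
    rw [PySem.List.enumerate_cons]
    by_cases h : pvIsGC c = true <;>
      simp [pvBreaks, h, ih (i + 1)]

lemma pv_foldl_max_max (t : List Int) : ∀ (a b : Int),
    t.foldl max (max a b) = max a (t.foldl max b) := by
  induction t with
  | nil => intro a b; rfl
  | cons c t ih =>
    intro a b
    simp only [List.foldl_cons, max_assoc, ih]

lemma pvMax1_cons_cons (x y : Int) (t : List Int) :
    pvMax1 (x :: y :: t) = max x (pvMax1 (y :: t)) := by
  simp only [pvMax1, List.foldl_cons, pv_foldl_max_max]

-- the max of the consecutive gaps of prev :: bs ++ [fin] is pvG prev bs fin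
lemma pvMax1_gaps_cons (x y z : Int) (r : List Int) :
    pvMax1 (pvGaps (x :: y :: z :: r)) = max (y - x - 1) (pvMax1 (pvGaps (y :: z :: r))) := by
  have h : pvGaps (x :: y :: z :: r) = (y - x - 1) :: (z - y - 1) :: pvGaps (z :: r) := rfl
  rw [h, pvMax1_cons_cons]
  rfl

lemma pv_gaps_pvG (bs : List Int) : ∀ (prev fin : Int),
    pvMax1 (pvGaps (prev :: (bs ++ [fin]))) = pvG prev bs fin := by
  induction bs with
  | nil => intro prev fin; rfl
  | cons b t ih =>
    intro prev fin
    obtain ⟨z, r, hzr⟩ : ∃ z r, t ++ [fin] = z :: r := by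
      cases t <;> exact ⟨_, _, rfl⟩
    rw [List.cons_append, hzr, pvMax1_gaps_cons, ← hzr, pvG]
    congr 1
    exact ih b fin

-- ===== VERDICT (by name: the statement is the Claim_ definition above) =====
theorem gc_block_length_spec : Claim_equal_gc_block_length := by
  intro seq _
  unfold Spec_gc_block_length gc_block_length gc_block_length_alt
  simp only []
  set s := (PySem.Str.upper seq).toList with hs
  have hA := pv_inv s (-1) 0 0 (by omega) (by omega) (by omega)
  rw [show (0 : Int) - (-1) - 1 = 0 by omega, zero_add] at hA
  have hGpos : 0 ≤ pvG (-1) (pvBreaks s 0) (s.length : Int) :=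
    pvG_nonneg _ _ _ (by omega) (by
      intro b hb
      have := pvBreaks_lt s 0 b hb
      omega)
  rw [hA, pv_enum_breaks s 0]
  have hlist : ([-1] ++ pvBreaks s 0 ++ [(s.length : Int)])
      = (-1 : Int) :: (pvBreaks s 0 ++ [(s.length : Int)]) := by simp
  rw [hlist, pv_gaps_pvG (pvBreaks s 0) (-1) (s.length : Int)]
  omega
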